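-- pv_equiv track=rewrite | github.com/0KC02/Portfolio-Projects | Web browser/browser_config.py | get_file_type_description
-- ===== SOURCE A (Python) =====
-- MIME_TYPES = {
--     'text/html': 'HTML Document',
--     'text/plain': 'Text Document',
--     'text/css': 'CSS Stylesheet',
--     'text/javascript': 'JavaScript File',
--     'application/json': 'JSON Document',
--     'application/xml': 'XML Document',
--     'image/jpeg': 'JPEG Image',
--     'image/png': 'PNG Image',
--     'image/gif': 'GIF Image',
--     'image/svg+xml': 'SVG Image',
--     'application/pdf': 'PDF Document',
--     'application/zip': 'ZIP Archive',
-- }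
--
-- def get_file_type_description(filename):
--     """Get description for file type"""
--     ext = '.' + filename.split('.')[-1].lower()
--     for mime_type, description in MIME_TYPES.items():
--         if ext in ['.html', '.htm'] and 'html' in mime_type:
--             return description
--         elif ext in ['.txt'] and 'plain' in mime_type:
--             return description
--         elif ext in ['.css'] and 'css' in mime_type:
--             return description
--         elif ext in ['.js'] and 'javascript' in mime_type:
--             return description
--     return 'Unknown File Type'
-- ===== SOURCE B (Python) =====
-- _EXT_DESCRIPTIONS = {
--     '.html': 'HTML Document',
--     '.htm': 'HTML Document',
--     '.txt': 'Text Document',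
--     '.css': 'CSS Stylesheet',
--     '.js': 'JavaScript File',
-- }
--
-- def get_file_type_description(filename):
--     """Get description for file type"""
--     ext = '.' + filename.split('.')[-1].lower()
--     return _EXT_DESCRIPTIONS.get(ext, 'Unknown File Type')
-- ===== Notes on version B (the rewrite author's own statement) =====
-- stated objective: simpler
-- what changed: Replaced the loop over the 12-entry MIME_TYPES dict and its four-way branch cascade with a single 5-entry extension-to-description table consulted by one .get lookup.
import Mathlib
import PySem

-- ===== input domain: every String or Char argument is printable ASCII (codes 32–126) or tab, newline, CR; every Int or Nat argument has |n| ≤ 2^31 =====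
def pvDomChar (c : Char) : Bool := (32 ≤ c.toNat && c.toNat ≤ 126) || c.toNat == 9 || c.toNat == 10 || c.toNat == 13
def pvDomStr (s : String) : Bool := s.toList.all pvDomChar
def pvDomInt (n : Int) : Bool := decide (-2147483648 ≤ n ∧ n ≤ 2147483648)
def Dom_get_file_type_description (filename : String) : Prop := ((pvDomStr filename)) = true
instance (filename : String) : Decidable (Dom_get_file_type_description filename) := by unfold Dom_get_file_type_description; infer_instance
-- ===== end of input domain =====

-- B replaces A's scan over MIME_TYPES and its branch cascade with one extension→description table lookup (simpler).

-- ===== PORT A =====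
def pvMimeTypes : List (String × String) :=
  [("text/html", "HTML Document"), ("text/plain", "Text Document"),
   ("text/css", "CSS Stylesheet"), ("text/javascript", "JavaScript File"),
   ("application/json", "JSON Document"), ("application/xml", "XML Document"),
   ("image/jpeg", "JPEG Image"), ("image/png", "PNG Image"),
   ("image/gif", "GIF Image"), ("image/svg+xml", "SVG Image"),
   ("application/pdf", "PDF Document"), ("application/zip", "ZIP Archive")]

-- the for-loop over MIME_TYPES.items() with its branch cascade, returning at the first hit
def pvLoopA (ext : String) : List (String × String) → String
  | [] => "Unknown File Type"
  | (mimeType, description) :: rest =>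
    if (ext = ".html" ∨ ext = ".htm") ∧ PySem.Str.isIn "html" mimeType then description
    else if ext = ".txt" ∧ PySem.Str.isIn "plain" mimeType then description
    else if ext = ".css" ∧ PySem.Str.isIn "css" mimeType then description
    else if ext = ".js" ∧ PySem.Str.isIn "javascript" mimeType then description
    else pvLoopA ext rest

def get_file_type_description (filename : String) : String :=
  -- ext = '.' + filename.split('.')[-1].lower()  (sep '.' ≠ '' so split? is some, and the split list is never empty, so the two getD defaults are unreachable)
  let ext := "." ++ PySem.Str.lower ((((PySem.Str.split? filename ".").getD []).getLast?).getD "")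
  pvLoopA ext pvMimeTypes

-- ===== PORT B =====
def pvExtDescriptions : PySem.Dict String String := PySem.Dict.ofList
  [(".html", "HTML Document"), (".htm", "HTML Document"), (".txt", "Text Document"),
   (".css", "CSS Stylesheet"), (".js", "JavaScript File")]

def get_file_type_description_alt (filename : String) : String :=
  let ext := "." ++ PySem.Str.lower ((((PySem.Str.split? filename ".").getD []).getLast?).getD "")
  PySem.Dict.getD pvExtDescriptions ext "Unknown File Type"

-- ===== PRECONDITION & SPEC =====
def Spec_get_file_type_description (filename : String) (out : String) : Prop := out = get_file_type_description_alt filename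
instance (filename : String) (out : String) : Decidable (Spec_get_file_type_description filename out) := by unfold Spec_get_file_type_description; infer_instance

-- ===== CLAIM (what is proved, stated in full; the proofs are below) =====
def Claim_equal_get_file_type_description : Prop := ∀ (filename : String), Dom_get_file_type_description filename → Spec_get_file_type_description filename (get_file_type_description filename)

-- ===== LEMMAS AND PROOFS =====

-- for ANY extension string, A's scan over MIME_TYPES and B's table lookup give the same answer
theorem pvLoop_eq_table (ext : String) :
    pvLoopA ext pvMimeTypes = PySem.Dict.getD pvExtDescriptions ext "Unknown File Type" := by
  by_cases h1 : ext = ".html"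
  · subst h1; decide
  by_cases h2 : ext = ".htm"
  · subst h2; decide
  by_cases h3 : ext = ".txt"
  · subst h3; decide
  by_cases h4 : ext = ".css"
  · subst h4; decide
  by_cases h5 : ext = ".js"
  · subst h5; decide
  · simp [pvLoopA, pvMimeTypes, pvExtDescriptions, PySem.Dict.ofList, PySem.Dict.update,
      List.foldl, PySem.Dict.getD_insert, PySem.Dict.getD_empty, h1, h2, h3, h4, h5]

-- ===== VERDICT (by name: the statement is the Claim_ definition above) =====
theorem get_file_type_description_spec : Claim_equal_get_file_type_description := by
  intro filename _
  unfold Spec_get_file_type_description get_file_type_description get_file_type_description_alt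
  exact pvLoop_eq_table _
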